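-- pv_equiv track=rewrite | github.com/antonioclim/CODEPROBE_PROJECTS | engine.py | _deduplicate_ranges
-- ===== SOURCE A (Python) =====
-- from typing import Any, Dict, Iterable, List, Optional, Sequence, Set, Tuple, Type
--
-- def _deduplicate_ranges(ranges: Sequence[Tuple[int, int]]) -> List[Tuple[int, int]]:
--     unique: List[Tuple[int, int]] = []
--     seen = set()
--     for item in ranges:
--         if item not in seen:
--             seen.add(item)
--             unique.append(item)
--     return sorted(unique)
-- ===== SOURCE B (Python) =====
-- from typing import List, Sequence, Tuple
--
-- def _deduplicate_ranges(ranges: Sequence[Tuple[int, int]]) -> List[Tuple[int, int]]: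
--     result: List[Tuple[int, int]] = []
--     prev = None
--     for item in sorted(ranges):
--         if prev is None or item != prev:
--             result.append(item)
--             prev = item
--     return result
-- ===== Notes on version B (the rewrite author's own statement) =====
-- stated objective: alternative
-- what changed: Instead of building a hash set of seen tuples and sorting the survivors, B sorts first and deduplicates in one linear adjacency scan, keeping only the last appended element as state.
import Mathlib
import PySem

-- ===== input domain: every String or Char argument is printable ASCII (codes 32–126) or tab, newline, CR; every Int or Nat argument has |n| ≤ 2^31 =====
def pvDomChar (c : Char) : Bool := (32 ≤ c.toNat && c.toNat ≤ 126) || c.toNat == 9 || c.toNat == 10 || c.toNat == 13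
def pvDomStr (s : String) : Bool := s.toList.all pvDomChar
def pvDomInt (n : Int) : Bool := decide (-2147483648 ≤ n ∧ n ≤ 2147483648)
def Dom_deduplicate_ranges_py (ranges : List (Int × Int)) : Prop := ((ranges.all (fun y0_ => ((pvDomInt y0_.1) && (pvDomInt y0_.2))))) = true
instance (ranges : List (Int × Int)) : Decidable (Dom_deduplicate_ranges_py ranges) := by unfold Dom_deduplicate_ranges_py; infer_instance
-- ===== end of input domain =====

-- B replaces A's seen-set + final sort by sort-first then a single adjacency-dedup scan (alternative, same cost).

-- ===== PORT A =====
-- loop state: (unique, seen); Python's `for item in ranges: if item not in seen: seen.add(item); unique.append(item)`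
def deduplicate_ranges_py (ranges : List (Int × Int)) : List (Int × Int) :=
  let st := ranges.foldl
    (fun (st : List (Int × Int) × PySem.Set (Int × Int)) item =>
      if ¬ (PySem.Set.contains st.2 item) then (st.1 ++ [item], PySem.Set.add st.2 item) else st)
    ([], PySem.Set.empty)
  PySem.List.sorted2 st.1 (fun x => x.1) (fun x => x.2)

-- ===== PORT B =====
-- the adjacency scan: `prev` is the last appended element (None before the first append)
def pvAdjDedup (prev : Option (Int × Int)) : List (Int × Int) → List (Int × Int)
  | [] => []
  | x :: xs => if some x = prev then pvAdjDedup prev xs else x :: pvAdjDedup (some x) xs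

def deduplicate_ranges_py_alt (ranges : List (Int × Int)) : List (Int × Int) :=
  pvAdjDedup none (PySem.List.sorted2 ranges (fun x => x.1) (fun x => x.2))

-- ===== PRECONDITION & SPEC =====
def Spec_deduplicate_ranges_py (ranges : List (Int × Int)) (out : List (Int × Int)) : Prop := out = deduplicate_ranges_py_alt ranges
instance (ranges : List (Int × Int)) (out : List (Int × Int)) : Decidable (Spec_deduplicate_ranges_py ranges out) := by unfold Spec_deduplicate_ranges_py; infer_instance

-- ===== CLAIM (what is proved, stated in full; the proofs are below) =====
def Claim_equal_deduplicate_ranges_py : Prop := ∀ (ranges : List (Int × Int)), Dom_deduplicate_ranges_py ranges → Spec_deduplicate_ranges_py ranges (deduplicate_ranges_py ranges)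

-- ===== LEMMAS AND PROOFS =====

-- Python's tuple comparison used by sorted2 on pairs is exactly '<' on Lex (Int × Int)
theorem pv_lt_eq_lex (a b : Int × Int) :
    (decide (a.1 < b.1) || (!decide (b.1 < a.1) && decide (a.2 < b.2))) = decide (toLex a < toLex b) := by
  by_cases h1 : a.1 < b.1 <;> by_cases h2 : b.1 < a.1 <;> by_cases h3 : a.2 < b.2 <;>
    simp [h1, h2, h3, Prod.Lex.lt_iff] <;> omega

theorem pv_sorted2_eq_sorted_lex (xs : List (Int × Int)) :
    PySem.List.sorted2 xs (fun x => x.1) (fun x => x.2) = PySem.List.sorted xs (fun x => toLex x) := by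
  unfold PySem.List.sorted2 PySem.List.sorted
  simp only []
  congr 1
  funext a x
  congr 1
  funext p q
  exact pv_lt_eq_lex p q

-- A's loop keeps `unique` and `seen` equal as lists; both are Set.ofList of the prefix
theorem pv_foldl_pair (l : List (Int × Int)) (s : List (Int × Int)) :
    l.foldl
      (fun (st : List (Int × Int) × PySem.Set (Int × Int)) item =>
        if ¬ (PySem.Set.contains st.2 item) then (st.1 ++ [item], PySem.Set.add st.2 item) else st)
      (s, s)
    = (l.foldl PySem.Set.add s, l.foldl PySem.Set.add s) := by
  induction l generalizing s with
  | nil => rfl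
  | cons x t ih =>
    have hstep :
        (fun (st : List (Int × Int) × PySem.Set (Int × Int)) item =>
          if ¬ (PySem.Set.contains st.2 item) then (st.1 ++ [item], PySem.Set.add st.2 item) else st)
          (s, s) x = (PySem.Set.add s x, PySem.Set.add s x) := by
      by_cases hc : PySem.Set.contains s x = true <;>
        simp [PySem.Set.add, PySem.Set.contains] at hc ⊢ <;> simp [hc]
    simp only [List.foldl_cons, hstep, ih]

-- the adjacency scan on a weakly sorted tail, below a strict lower bound `p`
theorem pv_adj_strong (s : List (Int × Int)) :
    ∀ p : Int × Int, s.Pairwise (fun a b => toLex a ≤ toLex b) → (∀ y ∈ s, toLex p ≤ toLex y) →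
      ((∀ x, x ∈ pvAdjDedup (some p) s ↔ x ∈ s ∧ x ≠ p) ∧
       (pvAdjDedup (some p) s).Pairwise (fun a b => toLex a < toLex b) ∧
       (∀ y ∈ pvAdjDedup (some p) s, toLex p < toLex y)) := by
  induction s with
  | nil => intro p _ _; simp [pvAdjDedup]
  | cons a t ih =>
    intro p hpair hp
    have hta : ∀ y ∈ t, toLex a ≤ toLex y := by
      intro y hy; exact (List.pairwise_cons.mp hpair).1 y hy
    have hpt : t.Pairwise (fun a b => toLex a ≤ toLex b) := (List.pairwise_cons.mp hpair).2
    by_cases hap : a = p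
    · subst hap
      have hpa : ∀ y ∈ t, toLex a ≤ toLex y := hta
      obtain ⟨hm, hpw, hgt⟩ := ih a hpt hpa
      have hstep : pvAdjDedup (some a) (a :: t) = pvAdjDedup (some a) t := by
        simp [pvAdjDedup]
      rw [hstep]
      refine ⟨?_, ?_, ?_⟩
      · intro x
        rw [hm x]
        constructor
        · rintro ⟨hx, hne⟩; exact ⟨List.mem_cons_of_mem _ hx, hne⟩
        · rintro ⟨hx, hne⟩
          rcases List.mem_cons.mp hx with h | h
          · exact absurd h hne
          · exact ⟨h, hne⟩
      · exact hpw
      · exact hgt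
    · have hpa_lt : toLex p < toLex a := by
        have hle := hp a (List.mem_cons_self)
        rcases lt_or_eq_of_le hle with h | h
        · exact h
        · exact absurd (toLex.injective h).symm hap
      obtain ⟨hm, hpw, hgt⟩ := ih a hpt hta
      have hstep : pvAdjDedup (some p) (a :: t) = a :: pvAdjDedup (some a) t := by
        simp [pvAdjDedup, hap]
      refine ⟨?_, ?_, ?_⟩
      · intro x
        rw [hstep]
        simp only [List.mem_cons, hm x]
        constructor
        · rintro (rfl | ⟨hx, hne⟩)
          · exact ⟨Or.inl rfl, hap⟩
          · have : toLex p < toLex x := lt_of_lt_of_le hpa_lt (hta x hx)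
            exact ⟨Or.inr hx, fun h => by subst h; exact absurd rfl (ne_of_gt this)⟩
        · rintro ⟨hx | hx, hne⟩
          · exact Or.inl hx
          · by_cases hxa : x = a
            · exact Or.inl hxa
            · exact Or.inr ⟨hx, hxa⟩
      · rw [hstep]
        exact List.pairwise_cons.mpr ⟨hgt, hpw⟩
      · rw [hstep]
        intro y hy
        rcases List.mem_cons.mp hy with rfl | hy
        · exact hpa_lt
        · exact lt_trans hpa_lt (hgt y hy)

-- top-level adjacency scan on a weakly sorted list: same elements, strictly increasing
theorem pv_adj_none (s : List (Int × Int)) (hpair : s.Pairwise (fun a b => toLex a ≤ toLex b)) :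
    (∀ x, x ∈ pvAdjDedup none s ↔ x ∈ s) ∧
    (pvAdjDedup none s).Pairwise (fun a b => toLex a < toLex b) := by
  cases s with
  | nil => simp [pvAdjDedup]
  | cons a t =>
    have hta : ∀ y ∈ t, toLex a ≤ toLex y := fun y hy => (List.pairwise_cons.mp hpair).1 y hy
    obtain ⟨hm, hpw, hgt⟩ := pv_adj_strong t a (List.pairwise_cons.mp hpair).2 hta
    have hstep : pvAdjDedup none (a :: t) = a :: pvAdjDedup (some a) t := by
      simp [pvAdjDedup]
    constructor
    · intro x
      rw [hstep]
      simp only [List.mem_cons, hm x]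
      constructor
      · rintro (rfl | ⟨hx, _⟩)
        · exact Or.inl rfl
        · exact Or.inr hx
      · rintro (rfl | hx)
        · exact Or.inl rfl
        · by_cases hxa : x = a
          · exact Or.inl hxa
          · exact Or.inr ⟨hx, hxa⟩
    · rw [hstep]
      exact List.pairwise_cons.mpr ⟨hgt, hpw⟩

-- ===== VERDICT (by name: the statement is the Claim_ definition above) =====
theorem deduplicate_ranges_py_spec : Claim_equal_deduplicate_ranges_py := by
  intro ranges _
  unfold Spec_deduplicate_ranges_py deduplicate_ranges_py deduplicate_ranges_py_alt
  rw [pv_sorted2_eq_sorted_lex, pv_sorted2_eq_sorted_lex]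
  have hfold := pv_foldl_pair ranges []
  simp only [PySem.Set.empty] at *
  rw [hfold]
  have hu : ranges.foldl PySem.Set.add [] = PySem.Set.ofList ranges :=
    (PySem.Set.ofList_eq_foldl ranges).symm
  rw [hu]
  -- the sorted input to the adjacency scan
  set s := PySem.List.sorted ranges (fun x => toLex x) with hs
  have hpair : s.Pairwise (fun a b => toLex a ≤ toLex b) :=
    PySem.List.sorted_pairwise ranges (fun x => toLex x)
  obtain ⟨hmem, hlt⟩ := pv_adj_none s hpair
  -- the scan's result is a strictly increasing rearrangement of the distinct elements
  have hnods : (pvAdjDedup none s).Nodup := by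
    refine List.Pairwise.imp ?_ hlt
    intro a b hab h
    subst h; exact absurd rfl (ne_of_gt hab)
  have hperm : (pvAdjDedup none s).Perm (PySem.Set.ofList ranges) := by
    rw [List.perm_ext_iff_of_nodup hnods (PySem.Set.nodup_ofList ranges)]
    intro x
    rw [hmem x, PySem.Set.mem_ofList, hs]
    exact PySem.List.mem_sorted ranges (fun x => toLex x) false x
  have hfin := PySem.List.sorted_eq_of_perm_of_pairwise_lt (PySem.Set.ofList ranges)
    (pvAdjDedup none s) (fun x => toLex x) hperm hlt
  simpa [hs] using hfin
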